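-- pv_equiv track=rewrite | github.com/ckoons/BubbleSpacetimeTheory | play/toy_257b_verify_c10.py | build_spectrum
-- ===== SOURCE A (Python) =====
-- def _dim_B(p, q, r):
--     lam = [0] * (r + 1)
--     lam[1] = p; lam[2] = q
--     L = [0] * (r + 1); P = [0] * (r + 1)
--     for i in range(1, r + 1):
--         P[i] = 2 * r - 2 * i + 1
--         L[i] = 2 * lam[i] + P[i]
--     num = den = 1
--     for i in range(1, r + 1):
--         for j in range(i + 1, r + 1):
--             num *= (L[i]**2 - L[j]**2)
--             den *= (P[i]**2 - P[j]**2)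
--     for i in range(1, r + 1):
--         num *= L[i]; den *= P[i]
--     return num // den
--
-- def _dim_D(p, q, r):
--     lam = [0] * (r + 1)
--     lam[1] = p; lam[2] = q
--     l = [0] * (r + 1); rho = [0] * (r + 1)
--     for i in range(1, r + 1):
--         rho[i] = r - i; l[i] = lam[i] + rho[i]
--     num = den = 1
--     for i in range(1, r + 1):
--         for j in range(i + 1, r + 1):
--             num *= (l[i]**2 - l[j]**2)
--             d = rho[i]**2 - rho[j]**2
--             if d == 0: return 0
--             den *= d
--     return num // den
--
-- def dim_SO(p, q, N):
--     if N < 5: raise ValueError(f"Need N >= 5, got {N}")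
--     return _dim_B(p, q, (N-1)//2) if N % 2 == 1 else _dim_D(p, q, N//2)
--
-- def build_spectrum(n, P_max=500):
--     N = n + 2
--     spec = {}
--     for p in range(P_max):
--         for q in range(p + 1):
--             lam = p * (p + n) + q * (q + n - 2)
--             d = dim_SO(p, q, N)
--             if d > 0:
--                 spec[lam] = spec.get(lam, 0) + d
--     items = sorted(spec.items())
--     return [lam for lam, _ in items], [d for _, d in items]
-- ===== SOURCE B (Python) =====
-- def _dim_B_fast(p, q, r):
--     # Reduced Weyl product for so(2r+1) with two-row weight (p, q, 0, ..., 0):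
--     # every factor whose both indices are >= 3 is identical in numerator and
--     # denominator, so only the O(r) factors touching rows 1 and 2 remain.
--     L1 = 2 * p + 2 * r - 1
--     L2 = 2 * q + 2 * r - 3
--     P1 = 2 * r - 1
--     P2 = 2 * r - 3
--     num = L1 * L2 * (L1 * L1 - L2 * L2)
--     den = P1 * P2 * (P1 * P1 - P2 * P2)
--     for j in range(3, r + 1):
--         c = (2 * r - 2 * j + 1) ** 2
--         num *= (L1 * L1 - c) * (L2 * L2 - c)
--         den *= (P1 * P1 - c) * (P2 * P2 - c)
--     return num // den
--
--
-- def _dim_D_fast(p, q, r):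
--     # Same reduction for so(2r); the rho_i = r - i are distinct and nonnegative,
--     # so no denominator factor can vanish.
--     L1 = p + r - 1
--     L2 = q + r - 2
--     P1 = r - 1
--     P2 = r - 2
--     num = L1 * L1 - L2 * L2
--     den = P1 * P1 - P2 * P2
--     for j in range(3, r + 1):
--         c = (r - j) ** 2
--         num *= (L1 * L1 - c) * (L2 * L2 - c)
--         den *= (P1 * P1 - c) * (P2 * P2 - c)
--     return num // den
--
--
-- def dim_SO(p, q, N):
--     if N < 5:
--         raise ValueError(f"Need N >= 5, got {N}")
--     return _dim_B_fast(p, q, (N - 1) // 2) if N % 2 == 1 else _dim_D_fast(p, q, N // 2)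
--
--
-- def build_spectrum(n, P_max=500):
--     # Collect flat (lam, d) pairs, sort by lam, merge equal-lam runs in one pass.
--     N = n + 2
--     pairs = []
--     for p in range(P_max):
--         for q in range(p + 1):
--             d = dim_SO(p, q, N)
--             if d > 0:
--                 pairs.append((p * (p + n) + q * (q + n - 2), d))
--     pairs.sort(key=lambda t: t[0])
--     lams, dims = [], []
--     for lam, d in pairs:
--         if lams and lams[-1] == lam:
--             dims[-1] += d
--         else:
--             lams.append(lam)
--             dims.append(d)
--     return lams, dims
-- ===== Notes on version B (the rewrite author's own statement) =====
-- stated objective: faster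
-- what changed: B replaces the O(r^2) Weyl-product loops of _dim_B/_dim_D by the algebraically reduced O(r) product (factors with both indices >= 3 cancel between numerator and denominator), and aggregates via a flat (lam,d) pair list sorted once and merged in one grouping pass instead of a running dict.
import Mathlib
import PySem

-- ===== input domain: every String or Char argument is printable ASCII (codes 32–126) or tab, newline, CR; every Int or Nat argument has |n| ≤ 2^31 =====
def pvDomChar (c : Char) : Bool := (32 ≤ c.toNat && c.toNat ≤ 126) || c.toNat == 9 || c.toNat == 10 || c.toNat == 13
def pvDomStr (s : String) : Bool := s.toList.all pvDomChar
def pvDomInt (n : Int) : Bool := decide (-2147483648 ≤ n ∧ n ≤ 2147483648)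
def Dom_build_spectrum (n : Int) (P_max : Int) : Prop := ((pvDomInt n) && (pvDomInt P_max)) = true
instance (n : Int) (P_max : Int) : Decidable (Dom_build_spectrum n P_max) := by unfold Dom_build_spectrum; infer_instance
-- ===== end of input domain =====

-- B reduces the O(r^2) Weyl dimension products to the O(r) factors touching rows 1 and 2
-- (the rest cancel between numerator and denominator) and aggregates via a flat pair list
-- sorted once and merged in one grouping pass instead of a running dict (objective: faster).

-- ===== PORT A =====
-- Python list indexing lam[i] / L[i] / P[i] is ported as PySem.List.pyGetD _ i 0 and
-- assignment as List.set i.toNat; exact here because every index used is in range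
-- (1 ≤ i ≤ r with lists of length r+1; dim_SO is only reached with N ≥ 5, i.e. r ≥ 2,
-- inputs on which Python raises ValueError are excluded by Pre_build_spectrum).
def pvDimB (p : Int) (q : Int) (r : Int) : Int :=
  let lam := ((List.replicate (r + 1).toNat (0 : Int)).set 1 p).set 2 q
  let LP := (PySem.List.pyRange 1 (r + 1) 1).foldl
      (fun (LP : List Int × List Int) i =>
        let P := LP.2.set i.toNat (2 * r - 2 * i + 1)
        let L := LP.1.set i.toNat (2 * PySem.List.pyGetD lam i 0 + PySem.List.pyGetD P i 0)
        (L, P))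
      (List.replicate (r + 1).toNat 0, List.replicate (r + 1).toNat 0)
  let nd := (PySem.List.pyRange 1 (r + 1) 1).foldl
      (fun (nd : Int × Int) i =>
        (PySem.List.pyRange (i + 1) (r + 1) 1).foldl
          (fun (nd : Int × Int) j =>
            (nd.1 * ((PySem.List.pyGetD LP.1 i 0) ^ 2 - (PySem.List.pyGetD LP.1 j 0) ^ 2),
             nd.2 * ((PySem.List.pyGetD LP.2 i 0) ^ 2 - (PySem.List.pyGetD LP.2 j 0) ^ 2)))
          nd)
      (1, 1)
  let nd2 := (PySem.List.pyRange 1 (r + 1) 1).foldl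
      (fun (nd : Int × Int) i =>
        (nd.1 * PySem.List.pyGetD LP.1 i 0, nd.2 * PySem.List.pyGetD LP.2 i 0))
      nd
  PySem.Int.floordiv nd2.1 nd2.2

-- the early 'return 0' of _dim_D is modelled by an Option state (none = returned 0)
def pvDimD (p : Int) (q : Int) (r : Int) : Int :=
  let lam := ((List.replicate (r + 1).toNat (0 : Int)).set 1 p).set 2 q
  let LR := (PySem.List.pyRange 1 (r + 1) 1).foldl
      (fun (LR : List Int × List Int) i =>
        let rho := LR.2.set i.toNat (r - i)
        let l := LR.1.set i.toNat (PySem.List.pyGetD lam i 0 + PySem.List.pyGetD rho i 0)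
        (l, rho))
      (List.replicate (r + 1).toNat 0, List.replicate (r + 1).toNat 0)
  let res := (PySem.List.pyRange 1 (r + 1) 1).foldl
      (fun (st : Option (Int × Int)) i =>
        (PySem.List.pyRange (i + 1) (r + 1) 1).foldl
          (fun (st : Option (Int × Int)) j =>
            match st with
            | none => none
            | some nd =>
              let nu := nd.1 * ((PySem.List.pyGetD LR.1 i 0) ^ 2 - (PySem.List.pyGetD LR.1 j 0) ^ 2)
              let d := (PySem.List.pyGetD LR.2 i 0) ^ 2 - (PySem.List.pyGetD LR.2 j 0) ^ 2
              if d = 0 then none else some (nu, nd.2 * d))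
          st)
      (some (1, 1))
  match res with
  | none => 0
  | some nd => PySem.Int.floordiv nd.1 nd.2

-- dim_SO; the 'raise ValueError' branch (N < 5) is excluded by Pre_build_spectrum
def pvDimSO (p : Int) (q : Int) (N : Int) : Int :=
  if PySem.Int.mod N 2 = 1 then pvDimB p q (PySem.Int.floordiv (N - 1) 2)
  else pvDimD p q (PySem.Int.floordiv N 2)

-- sorted(spec.items()) sorts int pairs lexicographically = PySem.List.sorted2 (exact)
def build_spectrum (n : Int) (P_max : Int) : List Int × List Int :=
  let N := n + 2
  let spec := (PySem.List.pyRange 0 P_max 1).foldl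
      (fun (spec : PySem.Dict Int Int) p =>
        (PySem.List.pyRange 0 (p + 1) 1).foldl
          (fun (spec : PySem.Dict Int Int) q =>
            let lam := p * (p + n) + q * (q + n - 2)
            let d := pvDimSO p q N
            if d > 0 then spec.insert lam (spec.getD lam 0 + d) else spec)
          spec)
      PySem.Dict.empty
  let items := PySem.List.sorted2 spec.items (fun t => t.1) (fun t => t.2) false
  (items.map (fun t => t.1), items.map (fun t => t.2))

-- ===== PORT B =====
-- _dim_B_fast: only the O(r) Weyl factors touching rows 1 and 2
def pvDimBAlt (p : Int) (q : Int) (r : Int) : Int :=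
  let L1 := 2 * p + 2 * r - 1
  let L2 := 2 * q + 2 * r - 3
  let P1 := 2 * r - 1
  let P2 := 2 * r - 3
  let nd := (PySem.List.pyRange 3 (r + 1) 1).foldl
      (fun (nd : Int × Int) j =>
        let c := (2 * r - 2 * j + 1) ^ 2
        (nd.1 * ((L1 * L1 - c) * (L2 * L2 - c)),
         nd.2 * ((P1 * P1 - c) * (P2 * P2 - c))))
      (L1 * L2 * (L1 * L1 - L2 * L2), P1 * P2 * (P1 * P1 - P2 * P2))
  PySem.Int.floordiv nd.1 nd.2

-- _dim_D_fast
def pvDimDAlt (p : Int) (q : Int) (r : Int) : Int :=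
  let L1 := p + r - 1
  let L2 := q + r - 2
  let P1 := r - 1
  let P2 := r - 2
  let nd := (PySem.List.pyRange 3 (r + 1) 1).foldl
      (fun (nd : Int × Int) j =>
        let c := (r - j) ^ 2
        (nd.1 * ((L1 * L1 - c) * (L2 * L2 - c)),
         nd.2 * ((P1 * P1 - c) * (P2 * P2 - c))))
      (L1 * L1 - L2 * L2, P1 * P1 - P2 * P2)
  PySem.Int.floordiv nd.1 nd.2

-- B's dim_SO; the 'raise ValueError' branch (N < 5) is excluded by Pre_build_spectrum
def pvDimSOAlt (p : Int) (q : Int) (N : Int) : Int :=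
  if PySem.Int.mod N 2 = 1 then pvDimBAlt p q (PySem.Int.floordiv (N - 1) 2)
  else pvDimDAlt p q (PySem.Int.floordiv N 2)

-- dims[-1] += d is ported with dropLast/getLastD 0; exact because dims is nonempty
-- exactly when lams is (the branch is guarded by lams.getLast? == some lam)
def build_spectrum_alt (n : Int) (P_max : Int) : List Int × List Int :=
  let N := n + 2
  let pairs := (PySem.List.pyRange 0 P_max 1).foldl
      (fun (acc : List (Int × Int)) p =>
        (PySem.List.pyRange 0 (p + 1) 1).foldl
          (fun (acc : List (Int × Int)) q =>
            let d := pvDimSOAlt p q N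
            if d > 0 then acc ++ [(p * (p + n) + q * (q + n - 2), d)] else acc)
          acc)
      []
  let sortedPairs := PySem.List.sorted pairs (fun t => t.1) false
  sortedPairs.foldl
    (fun (st : List Int × List Int) t =>
      if st.1.getLast? == some t.1 then (st.1, st.2.dropLast ++ [st.2.getLastD 0 + t.2])
      else (st.1 ++ [t.1], st.2 ++ [t.2]))
    ([], [])

-- ===== PRECONDITION & SPEC =====
-- Pre_ excludes exactly the inputs where Python A raises ValueError (dim_SO needs
-- N = n + 2 ≥ 5, reached as soon as the loop body runs, i.e. when P_max ≥ 1).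
def Pre_build_spectrum (n : Int) (P_max : Int) : Prop := P_max ≤ 0 ∨ 3 ≤ n
instance (n : Int) (P_max : Int) : Decidable (Pre_build_spectrum n P_max) := by
  unfold Pre_build_spectrum; infer_instance

def pvWitness_build_spectrum : Int × Int := (3, 4)

def Spec_build_spectrum (n : Int) (P_max : Int) (out : List Int × List Int) : Prop := out = build_spectrum_alt n P_max
instance (n : Int) (P_max : Int) (out : List Int × List Int) : Decidable (Spec_build_spectrum n P_max out) := by unfold Spec_build_spectrum; infer_instance

-- ===== CLAIM (what is proved, stated in full; the proofs are below) =====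
def Claim_equal_build_spectrum : Prop := ∀ (n : Int) (P_max : Int), Dom_build_spectrum n P_max → Pre_build_spectrum n P_max → Spec_build_spectrum n P_max (build_spectrum n P_max)

-- ===== LEMMAS AND PROOFS =====

-- ---- part 1: the two dimension computations agree (N >= 5) ----

def pvLamf (p q i : Int) : Int := if i = 1 then p else if i = 2 then q else 0

def pvPB (r i : Int) : Int := 2 * r - 2 * i + 1

def pvLB (p q r i : Int) : Int := 2 * pvLamf p q i + pvPB r i

def pvRhoD (r i : Int) : Int := r - i

def pvLD (p q r i : Int) : Int := pvLamf p q i + pvRhoD r i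

lemma pv_lam_getD (p q r i : Int) (h1 : 1 ≤ i) (h2 : i ≤ r) :
    PySem.List.pyGetD (((List.replicate (r + 1).toNat (0 : Int)).set 1 p).set 2 q) i 0
      = pvLamf p q i := by
  rw [PySem.List.pyGetD_eq_getElem _ 0 (by omega) (by simp; omega)]
  simp only [List.getElem_set, List.getElem_replicate]
  unfold pvLamf
  split_ifs <;> omega

lemma pv_pair_prod (l : List Int) (f g : Int → Int) (a b : Int) :
    l.foldl (fun (nd : Int × Int) j => (nd.1 * f j, nd.2 * g j)) (a, b)
      = (a * (l.map f).prod, b * (l.map g).prod) := by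
  induction l generalizing a b with
  | nil => simp
  | cons x t ih => simp [ih, mul_assoc]

lemma pv_nested_prod (R : List Int) (Ri : Int → List Int) (Fn Fd : Int → Int → Int) (a b : Int) :
    R.foldl (fun (nd : Int × Int) i =>
        (Ri i).foldl (fun (nd : Int × Int) j => (nd.1 * Fn i j, nd.2 * Fd i j)) nd) (a, b)
      = (a * (R.map (fun i => ((Ri i).map (Fn i)).prod)).prod,
         b * (R.map (fun i => ((Ri i).map (Fd i)).prod)).prod) := by
  induction R generalizing a b with
  | nil => simp
  | cons x t ih => simp [pv_pair_prod, ih, mul_assoc]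

lemma pv_build_inv (r : Int) (lam : List Int) (lamv G : Int → Int) (F : Int → Int → Int)
    (hlam : ∀ i : Int, 1 ≤ i → i ≤ r → PySem.List.pyGetD lam i 0 = lamv i) (m : Nat) (hm : (m : Int) ≤ r) :
    (((PySem.List.pyRange 1 (1 + (m : Int)) 1).foldl
        (fun (LP : List Int × List Int) i =>
          (LP.1.set i.toNat (F (PySem.List.pyGetD lam i 0)
              (PySem.List.pyGetD (LP.2.set i.toNat (G i)) i 0)),
           LP.2.set i.toNat (G i)))
        (List.replicate (r + 1).toNat 0, List.replicate (r + 1).toNat 0)).1.length = (r + 1).toNat)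
    ∧ (((PySem.List.pyRange 1 (1 + (m : Int)) 1).foldl
        (fun (LP : List Int × List Int) i =>
          (LP.1.set i.toNat (F (PySem.List.pyGetD lam i 0)
              (PySem.List.pyGetD (LP.2.set i.toNat (G i)) i 0)),
           LP.2.set i.toNat (G i)))
        (List.replicate (r + 1).toNat 0, List.replicate (r + 1).toNat 0)).2.length = (r + 1).toNat)
    ∧ ∀ i : Int, 1 ≤ i → i ≤ r →
        (PySem.List.pyGetD ((PySem.List.pyRange 1 (1 + (m : Int)) 1).foldl
            (fun (LP : List Int × List Int) i =>
              (LP.1.set i.toNat (F (PySem.List.pyGetD lam i 0)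
                  (PySem.List.pyGetD (LP.2.set i.toNat (G i)) i 0)),
               LP.2.set i.toNat (G i)))
            (List.replicate (r + 1).toNat 0, List.replicate (r + 1).toNat 0)).1 i 0
          = if i ≤ (m : Int) then F (lamv i) (G i) else 0)
        ∧ (PySem.List.pyGetD ((PySem.List.pyRange 1 (1 + (m : Int)) 1).foldl
            (fun (LP : List Int × List Int) i =>
              (LP.1.set i.toNat (F (PySem.List.pyGetD lam i 0)
                  (PySem.List.pyGetD (LP.2.set i.toNat (G i)) i 0)),
               LP.2.set i.toNat (G i)))
            (List.replicate (r + 1).toNat 0, List.replicate (r + 1).toNat 0)).2 i 0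
          = if i ≤ (m : Int) then G i else 0) := by
  induction m with
  | zero =>
    rw [show (1 + ((0:Nat):Int)) = 1 by norm_num, PySem.List.pyRange_one_eq_nil (by omega)]
    simp only [List.foldl_nil]
    refine ⟨by simp, by simp, ?_⟩
    intro i hi1 hir
    constructor
    · rw [PySem.List.pyGetD_eq_getElem _ 0 (by omega) (by simp; omega)]
      rw [if_neg (by omega)]
      simp
    · rw [PySem.List.pyGetD_eq_getElem _ 0 (by omega) (by simp; omega)]
      rw [if_neg (by omega)]
      simp
  | succ k ih =>
    obtain ⟨hL, hP, hval⟩ := ih (by push_cast at hm ⊢; omega)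
    rw [show (1 + ((k+1:Nat):Int)) = (1 + (k:Int)) + 1 by push_cast; ring,
        PySem.List.pyRange_one_succ_right (by omega), List.foldl_append,
        List.foldl_cons, List.foldl_nil]
    set st := ((PySem.List.pyRange 1 (1 + (k : Int)) 1).foldl
        (fun (LP : List Int × List Int) i =>
          (LP.1.set i.toNat (F (PySem.List.pyGetD lam i 0)
              (PySem.List.pyGetD (LP.2.set i.toNat (G i)) i 0)),
           LP.2.set i.toNat (G i)))
        (List.replicate (r + 1).toNat 0, List.replicate (r + 1).toNat 0)) with hst
    have hk1 : (1:Int) ≤ 1 + (k:Int) := by omega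
    have hkr : (1:Int) + (k:Int) ≤ r := by push_cast at hm; omega
    have hread : PySem.List.pyGetD (st.2.set (1 + (k:Int)).toNat (G (1 + (k:Int)))) (1 + (k:Int)) 0
        = G (1 + (k:Int)) := by
      rw [PySem.List.pyGetD_eq_getElem _ 0 (by omega) (by simp [hP]; omega)]
      rw [List.getElem_set]
      simp
    refine ⟨by simp [hL], by simp [hP], ?_⟩
    intro i hi1 hir
    have hlen1 : ((st.1.set (1 + (k:Int)).toNat (F (PySem.List.pyGetD lam (1 + (k:Int)) 0)
        (PySem.List.pyGetD (st.2.set (1 + (k:Int)).toNat (G (1 + (k:Int)))) (1 + (k:Int)) 0)))).length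
        = (r+1).toNat := by simp [hL]
    constructor
    · show PySem.List.pyGetD (st.1.set (1 + (k:Int)).toNat _) i 0 = _
      rw [PySem.List.pyGetD_eq_getElem _ 0 (by omega) (by rw [List.length_set, hL]; omega)]
      rw [List.getElem_set]
      by_cases hcase : i = 1 + (k:Int)
      · rw [if_pos (by omega), hread, hlam _ hk1 hkr, hcase, if_pos (by push_cast; omega)]
      · rw [if_neg (by omega)]
        have := (hval i hi1 hir).1
        rw [PySem.List.pyGetD_eq_getElem _ 0 (by omega) (by rw [hL]; omega)] at this
        rw [this]
        by_cases hik : i ≤ (k:Int)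
        · rw [if_pos hik, if_pos (by push_cast; omega)]
        · rw [if_neg hik, if_neg (by push_cast; omega)]
    · show PySem.List.pyGetD (st.2.set (1 + (k:Int)).toNat _) i 0 = _
      rw [PySem.List.pyGetD_eq_getElem _ 0 (by omega) (by rw [List.length_set, hP]; omega)]
      rw [List.getElem_set]
      by_cases hcase : i = 1 + (k:Int)
      · rw [if_pos (by omega), hcase, if_pos (by push_cast; omega)]
      · rw [if_neg (by omega)]
        have := (hval i hi1 hir).2
        rw [PySem.List.pyGetD_eq_getElem _ 0 (by omega) (by rw [hP]; omega)] at this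
        rw [this]
        by_cases hik : i ≤ (k:Int)
        · rw [if_pos hik, if_pos (by push_cast; omega)]
        · rw [if_neg hik, if_neg (by push_cast; omega)]

lemma pv_floordiv_scale (a b c : Int) (hb : 0 < b) (hc : 0 < c) :
    PySem.Int.floordiv (a * c) (b * c) = PySem.Int.floordiv a b := by
  rw [PySem.Int.floordiv_eq_ediv_of_pos hb, PySem.Int.floordiv_eq_ediv_of_pos (by positivity)]
  rw [mul_comm a c, mul_comm b c, Int.mul_ediv_mul_of_pos _ _ hc]

lemma pv_sq_sub_pos (a b : Int) (h1 : 0 ≤ b) (h2 : b < a) : 0 < a ^ 2 - b ^ 2 := by nlinarith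

lemma pv_dimB_eq (p q r : Int) (hr : 2 ≤ r) : pvDimB p q r = pvDimBAlt p q r := by
  simp only [pvDimB, pvDimBAlt]
  have hinv := pv_build_inv r (((List.replicate (r + 1).toNat (0 : Int)).set 1 p).set 2 q)
      (pvLamf p q) (fun i => 2 * r - 2 * i + 1) (fun a b => 2 * a + b)
      (fun i h1 h2 => pv_lam_getD p q r i h1 h2) r.toNat (by omega)
  rw [show (1 + ((r.toNat : Nat) : Int)) = r + 1 from by omega] at hinv
  beta_reduce at hinv
  obtain ⟨hL, hP, hval⟩ := hinv
  set st := ((PySem.List.pyRange 1 (r + 1) 1).foldl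
      (fun (LP : List Int × List Int) i =>
        (LP.1.set i.toNat (2 * PySem.List.pyGetD (((List.replicate (r + 1).toNat (0 : Int)).set 1 p).set 2 q) i 0
            + PySem.List.pyGetD (LP.2.set i.toNat (2 * r - 2 * i + 1)) i 0),
         LP.2.set i.toNat (2 * r - 2 * i + 1)))
      (List.replicate (r + 1).toNat 0, List.replicate (r + 1).toNat 0)) with hst
  clear hst hL hP
  have hv1 : ∀ i : Int, 1 ≤ i → i ≤ r → PySem.List.pyGetD st.1 i 0 = pvLB p q r i := by
    intro i h1 h2
    have h := (hval i h1 h2).1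
    rw [if_pos (by omega)] at h
    rw [h]; rfl
  have hv2 : ∀ i : Int, 1 ≤ i → i ≤ r → PySem.List.pyGetD st.2 i 0 = pvPB r i := by
    intro i h1 h2
    have h := (hval i h1 h2).2
    rw [if_pos (by omega)] at h
    rw [h]; rfl
  clear hval
  rw [pv_nested_prod, pv_pair_prod, pv_pair_prod]
  dsimp only
  have hA1 : (PySem.List.pyRange 1 (r + 1) 1).map
      (fun i => ((PySem.List.pyRange (i + 1) (r + 1) 1).map
        (fun j => PySem.List.pyGetD st.1 i 0 ^ 2 - PySem.List.pyGetD st.1 j 0 ^ 2)).prod)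
      = (PySem.List.pyRange 1 (r + 1) 1).map
      (fun i => ((PySem.List.pyRange (i + 1) (r + 1) 1).map
        (fun j => pvLB p q r i ^ 2 - pvLB p q r j ^ 2)).prod) := by
    refine List.map_congr_left (fun i hi => ?_)
    rw [PySem.List.mem_pyRange_one] at hi
    congr 1
    refine List.map_congr_left (fun j hj => ?_)
    rw [PySem.List.mem_pyRange_one] at hj
    rw [hv1 i (by omega) (by omega), hv1 j (by omega) (by omega)]
  have hA2 : (PySem.List.pyRange 1 (r + 1) 1).map
      (fun i => ((PySem.List.pyRange (i + 1) (r + 1) 1).map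
        (fun j => PySem.List.pyGetD st.2 i 0 ^ 2 - PySem.List.pyGetD st.2 j 0 ^ 2)).prod)
      = (PySem.List.pyRange 1 (r + 1) 1).map
      (fun i => ((PySem.List.pyRange (i + 1) (r + 1) 1).map
        (fun j => pvPB r i ^ 2 - pvPB r j ^ 2)).prod) := by
    refine List.map_congr_left (fun i hi => ?_)
    rw [PySem.List.mem_pyRange_one] at hi
    congr 1
    refine List.map_congr_left (fun j hj => ?_)
    rw [PySem.List.mem_pyRange_one] at hj
    rw [hv2 i (by omega) (by omega), hv2 j (by omega) (by omega)]
  have hA3 : (PySem.List.pyRange 1 (r + 1) 1).map (fun i => PySem.List.pyGetD st.1 i 0)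
      = (PySem.List.pyRange 1 (r + 1) 1).map (fun i => pvLB p q r i) := by
    refine List.map_congr_left (fun i hi => ?_)
    rw [PySem.List.mem_pyRange_one] at hi
    exact hv1 i (by omega) (by omega)
  have hA4 : (PySem.List.pyRange 1 (r + 1) 1).map (fun i => PySem.List.pyGetD st.2 i 0)
      = (PySem.List.pyRange 1 (r + 1) 1).map (fun i => pvPB r i) := by
    refine List.map_congr_left (fun i hi => ?_)
    rw [PySem.List.mem_pyRange_one] at hi
    exact hv2 i (by omega) (by omega)
  rw [hA1, hA2, hA3, hA4]
  clear hA1 hA2 hA3 hA4 hv1 hv2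
  clear_value st
  clear st
  rw [show PySem.List.pyRange 1 (r + 1) 1 = 1 :: 2 :: PySem.List.pyRange 3 (r + 1) 1 from by
    rw [PySem.List.pyRange_one_cons (by omega : (1:Int) < r + 1),
        show (1:Int) + 1 = 2 from by norm_num,
        PySem.List.pyRange_one_cons (by omega : (2:Int) < r + 1),
        show (2:Int) + 1 = 3 from by norm_num]]
  simp only [List.map_cons, List.prod_cons]
  rw [show (1:Int) + 1 = 2 from by norm_num, show (2:Int) + 1 = 3 from by norm_num]
  rw [show PySem.List.pyRange 2 (r + 1) 1 = 2 :: PySem.List.pyRange 3 (r + 1) 1 from by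
    rw [PySem.List.pyRange_one_cons (by omega : (2:Int) < r + 1),
        show (2:Int) + 1 = 3 from by norm_num]]
  simp only [List.map_cons, List.prod_cons]
  rw [show pvLB p q r 1 = 2 * p + 2 * r - 1 from by simp [pvLB, pvLamf, pvPB]; ring,
      show pvLB p q r 2 = 2 * q + 2 * r - 3 from by simp [pvLB, pvLamf, pvPB]; ring,
      show pvPB r 1 = 2 * r - 1 from by simp [pvPB]; ring,
      show pvPB r 2 = 2 * r - 3 from by simp [pvPB]; ring]
  rw [show (PySem.List.pyRange 3 (r + 1) 1).map (fun j => (2 * p + 2 * r - 1) ^ 2 - pvLB p q r j ^ 2)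
      = (PySem.List.pyRange 3 (r + 1) 1).map
        (fun j => (2 * p + 2 * r - 1) * (2 * p + 2 * r - 1) - (2 * r - 2 * j + 1) ^ 2) from by
    refine List.map_congr_left (fun j hj => ?_)
    rw [PySem.List.mem_pyRange_one] at hj
    simp [pvLB, pvLamf, pvPB, show j ≠ 1 from by omega, show j ≠ 2 from by omega]
    ring]
  rw [show (PySem.List.pyRange 3 (r + 1) 1).map (fun j => (2 * q + 2 * r - 3) ^ 2 - pvLB p q r j ^ 2)
      = (PySem.List.pyRange 3 (r + 1) 1).map
        (fun j => (2 * q + 2 * r - 3) * (2 * q + 2 * r - 3) - (2 * r - 2 * j + 1) ^ 2) from by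
    refine List.map_congr_left (fun j hj => ?_)
    rw [PySem.List.mem_pyRange_one] at hj
    simp [pvLB, pvLamf, pvPB, show j ≠ 1 from by omega, show j ≠ 2 from by omega]
    ring]
  rw [show (PySem.List.pyRange 3 (r + 1) 1).map (fun j => (2 * r - 1) ^ 2 - pvPB r j ^ 2)
      = (PySem.List.pyRange 3 (r + 1) 1).map
        (fun j => (2 * r - 1) * (2 * r - 1) - (2 * r - 2 * j + 1) ^ 2) from by
    refine List.map_congr_left (fun j hj => ?_)
    simp [pvPB]
    ring]
  rw [show (PySem.List.pyRange 3 (r + 1) 1).map (fun j => (2 * r - 3) ^ 2 - pvPB r j ^ 2)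
      = (PySem.List.pyRange 3 (r + 1) 1).map
        (fun j => (2 * r - 3) * (2 * r - 3) - (2 * r - 2 * j + 1) ^ 2) from by
    refine List.map_congr_left (fun j hj => ?_)
    simp [pvPB]
    ring]
  rw [show (PySem.List.pyRange 3 (r + 1) 1).map
        (fun i => ((PySem.List.pyRange (i + 1) (r + 1) 1).map
          (fun j => pvLB p q r i ^ 2 - pvLB p q r j ^ 2)).prod)
      = (PySem.List.pyRange 3 (r + 1) 1).map
        (fun i => ((PySem.List.pyRange (i + 1) (r + 1) 1).map
          (fun j => pvPB r i ^ 2 - pvPB r j ^ 2)).prod) from by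
    refine List.map_congr_left (fun i hi => ?_)
    rw [PySem.List.mem_pyRange_one] at hi
    congr 1
    refine List.map_congr_left (fun j hj => ?_)
    rw [PySem.List.mem_pyRange_one] at hj
    simp [pvLB, pvLamf, show i ≠ 1 from by omega, show i ≠ 2 from by omega,
      show j ≠ 1 from by omega, show j ≠ 2 from by omega]]
  rw [show (PySem.List.pyRange 3 (r + 1) 1).map (fun i => pvLB p q r i)
      = (PySem.List.pyRange 3 (r + 1) 1).map (fun i => pvPB r i) from by
    refine List.map_congr_left (fun i hi => ?_)
    rw [PySem.List.mem_pyRange_one] at hi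
    simp [pvLB, pvLamf, show i ≠ 1 from by omega, show i ≠ 2 from by omega]]
  rw [List.prod_map_mul, List.prod_map_mul]
  set a1 := (List.map (fun j => (2 * p + 2 * r - 1) * (2 * p + 2 * r - 1) - (2 * r - 2 * j + 1) ^ 2)
      (PySem.List.pyRange 3 (r + 1) 1)).prod with ha1
  set a2 := (List.map (fun j => (2 * q + 2 * r - 3) * (2 * q + 2 * r - 3) - (2 * r - 2 * j + 1) ^ 2)
      (PySem.List.pyRange 3 (r + 1) 1)).prod with ha2
  set d1 := (List.map (fun j => (2 * r - 1) * (2 * r - 1) - (2 * r - 2 * j + 1) ^ 2)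
      (PySem.List.pyRange 3 (r + 1) 1)).prod with hd1
  set d2 := (List.map (fun j => (2 * r - 3) * (2 * r - 3) - (2 * r - 2 * j + 1) ^ 2)
      (PySem.List.pyRange 3 (r + 1) 1)).prod with hd2
  set K := (List.map (fun i => ((PySem.List.pyRange (i + 1) (r + 1) 1).map
      (fun j => pvPB r i ^ 2 - pvPB r j ^ 2)).prod) (PySem.List.pyRange 3 (r + 1) 1)).prod with hK
  set M := (List.map (fun i => pvPB r i) (PySem.List.pyRange 3 (r + 1) 1)).prod with hM
  have hKpos : 0 < K := by
    rw [hK]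
    refine List.prod_pos (fun x hx => ?_)
    obtain ⟨i, hi, rfl⟩ := List.mem_map.1 hx
    rw [PySem.List.mem_pyRange_one] at hi
    refine List.prod_pos (fun y hy => ?_)
    obtain ⟨j, hj, rfl⟩ := List.mem_map.1 hy
    rw [PySem.List.mem_pyRange_one] at hj
    exact pv_sq_sub_pos _ _ (by unfold pvPB; omega) (by unfold pvPB; omega)
  have hMpos : 0 < M := by
    rw [hM]
    refine List.prod_pos (fun x hx => ?_)
    obtain ⟨i, hi, rfl⟩ := List.mem_map.1 hx
    rw [PySem.List.mem_pyRange_one] at hi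
    unfold pvPB
    omega
  have hd1pos : 0 < d1 := by
    rw [hd1]
    refine List.prod_pos (fun x hx => ?_)
    obtain ⟨j, hj, rfl⟩ := List.mem_map.1 hx
    rw [PySem.List.mem_pyRange_one] at hj
    have h := pv_sq_sub_pos (2 * r - 1) (2 * r - 2 * j + 1) (by omega) (by omega)
    nlinarith [h]
  have hd2pos : 0 < d2 := by
    rw [hd2]
    refine List.prod_pos (fun x hx => ?_)
    obtain ⟨j, hj, rfl⟩ := List.mem_map.1 hx
    rw [PySem.List.mem_pyRange_one] at hj
    have h := pv_sq_sub_pos (2 * r - 3) (2 * r - 2 * j + 1) (by omega) (by omega)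
    nlinarith [h]
  have hden : 0 < (2 * r - 1) * (2 * r - 3) * ((2 * r - 1) * (2 * r - 1) - (2 * r - 3) * (2 * r - 3)) * (d1 * d2) := by
    have hsc : 0 < (2 * r - 1) * (2 * r - 3) * ((2 * r - 1) * (2 * r - 1) - (2 * r - 3) * (2 * r - 3)) := by
      nlinarith
    exact mul_pos hsc (mul_pos hd1pos hd2pos)
  have hKM : 0 < K * M := mul_pos hKpos hMpos
  conv_rhs => rw [← pv_floordiv_scale _ _ (K * M) hden hKM]
  congr 1 <;> ring

lemma pv_optfold_inner (l : List Int) (Fn G : Int → Int) (hG : ∀ j ∈ l, G j ≠ 0) (nd : Int × Int) :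
    l.foldl (fun (st : Option (Int × Int)) j =>
        match st with
        | none => none
        | some nd => if G j = 0 then none else some (nd.1 * Fn j, nd.2 * G j)) (some nd)
      = some (l.foldl (fun (nd : Int × Int) j => (nd.1 * Fn j, nd.2 * G j)) nd) := by
  induction l generalizing nd with
  | nil => rfl
  | cons x t ih =>
    simp only [List.foldl_cons]
    rw [if_neg (hG x (by simp))]
    exact ih (fun j hj => hG j (by simp [hj])) _

lemma pv_optfold_outer (l : List Int) (T : Int → Option (Int × Int) → Option (Int × Int))
    (S : Int → Int × Int → Int × Int)
    (h : ∀ i ∈ l, ∀ nd, T i (some nd) = some (S i nd)) (nd : Int × Int) :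
    l.foldl (fun st i => T i st) (some nd) = some (l.foldl (fun nd i => S i nd) nd) := by
  induction l generalizing nd with
  | nil => rfl
  | cons x t ih =>
    simp only [List.foldl_cons]
    rw [h x (by simp) nd]
    exact ih (fun i hi nd => h i (by simp [hi]) nd) _

lemma pv_dimD_eq (p q r : Int) (hr : 3 ≤ r) : pvDimD p q r = pvDimDAlt p q r := by
  simp only [pvDimD, pvDimDAlt]
  have hinv := pv_build_inv r (((List.replicate (r + 1).toNat (0 : Int)).set 1 p).set 2 q)
      (pvLamf p q) (fun i => r - i) (fun a b => a + b)
      (fun i h1 h2 => pv_lam_getD p q r i h1 h2) r.toNat (by omega)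
  rw [show (1 + ((r.toNat : Nat) : Int)) = r + 1 from by omega] at hinv
  beta_reduce at hinv
  obtain ⟨hL, hP, hval⟩ := hinv
  set st := ((PySem.List.pyRange 1 (r + 1) 1).foldl
      (fun (LP : List Int × List Int) i =>
        (LP.1.set i.toNat (PySem.List.pyGetD (((List.replicate (r + 1).toNat (0 : Int)).set 1 p).set 2 q) i 0
            + PySem.List.pyGetD (LP.2.set i.toNat (r - i)) i 0),
         LP.2.set i.toNat (r - i)))
      (List.replicate (r + 1).toNat 0, List.replicate (r + 1).toNat 0)) with hst
  clear hst hL hP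
  have hv1 : ∀ i : Int, 1 ≤ i → i ≤ r → PySem.List.pyGetD st.1 i 0 = pvLD p q r i := by
    intro i h1 h2
    have h := (hval i h1 h2).1
    rw [if_pos (by omega)] at h
    rw [h]; rfl
  have hv2 : ∀ i : Int, 1 ≤ i → i ≤ r → PySem.List.pyGetD st.2 i 0 = pvRhoD r i := by
    intro i h1 h2
    have h := (hval i h1 h2).2
    rw [if_pos (by omega)] at h
    rw [h]; rfl
  clear hval
  have hopt := pv_optfold_outer (PySem.List.pyRange 1 (r + 1) 1)
      (fun i ost => (PySem.List.pyRange (i + 1) (r + 1) 1).foldl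
        (fun (ost : Option (Int × Int)) j =>
          match ost with
          | none => none
          | some nd => if (PySem.List.pyGetD st.2 i 0 ^ 2 - PySem.List.pyGetD st.2 j 0 ^ 2) = 0 then none
              else some (nd.1 * (PySem.List.pyGetD st.1 i 0 ^ 2 - PySem.List.pyGetD st.1 j 0 ^ 2),
                nd.2 * (PySem.List.pyGetD st.2 i 0 ^ 2 - PySem.List.pyGetD st.2 j 0 ^ 2))) ost)
      (fun i nd => (PySem.List.pyRange (i + 1) (r + 1) 1).foldl
        (fun (nd : Int × Int) j =>
          (nd.1 * (PySem.List.pyGetD st.1 i 0 ^ 2 - PySem.List.pyGetD st.1 j 0 ^ 2),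
           nd.2 * (PySem.List.pyGetD st.2 i 0 ^ 2 - PySem.List.pyGetD st.2 j 0 ^ 2))) nd)
      (by
        intro i hi nd
        rw [PySem.List.mem_pyRange_one] at hi
        refine pv_optfold_inner _ _ _ (fun j hj => ?_) nd
        rw [PySem.List.mem_pyRange_one] at hj
        rw [hv2 i (by omega) (by omega), hv2 j (by omega) (by omega)]
        have := pv_sq_sub_pos (pvRhoD r i) (pvRhoD r j) (by unfold pvRhoD; omega) (by unfold pvRhoD; omega)
        omega)
      (1, 1)
  beta_reduce at hopt
  rw [hopt]
  dsimp only
  rw [pv_nested_prod, pv_pair_prod]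
  dsimp only
  have hA1 : (PySem.List.pyRange 1 (r + 1) 1).map
      (fun i => ((PySem.List.pyRange (i + 1) (r + 1) 1).map
        (fun j => PySem.List.pyGetD st.1 i 0 ^ 2 - PySem.List.pyGetD st.1 j 0 ^ 2)).prod)
      = (PySem.List.pyRange 1 (r + 1) 1).map
      (fun i => ((PySem.List.pyRange (i + 1) (r + 1) 1).map
        (fun j => pvLD p q r i ^ 2 - pvLD p q r j ^ 2)).prod) := by
    refine List.map_congr_left (fun i hi => ?_)
    rw [PySem.List.mem_pyRange_one] at hi
    congr 1
    refine List.map_congr_left (fun j hj => ?_)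
    rw [PySem.List.mem_pyRange_one] at hj
    rw [hv1 i (by omega) (by omega), hv1 j (by omega) (by omega)]
  have hA2 : (PySem.List.pyRange 1 (r + 1) 1).map
      (fun i => ((PySem.List.pyRange (i + 1) (r + 1) 1).map
        (fun j => PySem.List.pyGetD st.2 i 0 ^ 2 - PySem.List.pyGetD st.2 j 0 ^ 2)).prod)
      = (PySem.List.pyRange 1 (r + 1) 1).map
      (fun i => ((PySem.List.pyRange (i + 1) (r + 1) 1).map
        (fun j => pvRhoD r i ^ 2 - pvRhoD r j ^ 2)).prod) := by
    refine List.map_congr_left (fun i hi => ?_)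
    rw [PySem.List.mem_pyRange_one] at hi
    congr 1
    refine List.map_congr_left (fun j hj => ?_)
    rw [PySem.List.mem_pyRange_one] at hj
    rw [hv2 i (by omega) (by omega), hv2 j (by omega) (by omega)]
  rw [hA1, hA2]
  clear hA1 hA2 hv1 hv2 hopt
  clear_value st
  clear st
  rw [show PySem.List.pyRange 1 (r + 1) 1 = 1 :: 2 :: PySem.List.pyRange 3 (r + 1) 1 from by
    rw [PySem.List.pyRange_one_cons (by omega : (1:Int) < r + 1),
        show (1:Int) + 1 = 2 from by norm_num,
        PySem.List.pyRange_one_cons (by omega : (2:Int) < r + 1),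
        show (2:Int) + 1 = 3 from by norm_num]]
  simp only [List.map_cons, List.prod_cons]
  rw [show (1:Int) + 1 = 2 from by norm_num, show (2:Int) + 1 = 3 from by norm_num]
  rw [show PySem.List.pyRange 2 (r + 1) 1 = 2 :: PySem.List.pyRange 3 (r + 1) 1 from by
    rw [PySem.List.pyRange_one_cons (by omega : (2:Int) < r + 1),
        show (2:Int) + 1 = 3 from by norm_num]]
  simp only [List.map_cons, List.prod_cons]
  rw [show pvLD p q r 1 = p + r - 1 from by simp [pvLD, pvLamf, pvRhoD]; ring,
      show pvLD p q r 2 = q + r - 2 from by simp [pvLD, pvLamf, pvRhoD]; ring,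
      show pvRhoD r 1 = r - 1 from by simp [pvRhoD],
      show pvRhoD r 2 = r - 2 from by simp [pvRhoD]]
  rw [show (PySem.List.pyRange 3 (r + 1) 1).map (fun j => (p + r - 1) ^ 2 - pvLD p q r j ^ 2)
      = (PySem.List.pyRange 3 (r + 1) 1).map
        (fun j => (p + r - 1) * (p + r - 1) - (r - j) ^ 2) from by
    refine List.map_congr_left (fun j hj => ?_)
    rw [PySem.List.mem_pyRange_one] at hj
    simp [pvLD, pvLamf, pvRhoD, show j ≠ 1 from by omega, show j ≠ 2 from by omega]
    ring]
  rw [show (PySem.List.pyRange 3 (r + 1) 1).map (fun j => (q + r - 2) ^ 2 - pvLD p q r j ^ 2)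
      = (PySem.List.pyRange 3 (r + 1) 1).map
        (fun j => (q + r - 2) * (q + r - 2) - (r - j) ^ 2) from by
    refine List.map_congr_left (fun j hj => ?_)
    rw [PySem.List.mem_pyRange_one] at hj
    simp [pvLD, pvLamf, pvRhoD, show j ≠ 1 from by omega, show j ≠ 2 from by omega]
    ring]
  rw [show (PySem.List.pyRange 3 (r + 1) 1).map (fun j => (r - 1) ^ 2 - pvRhoD r j ^ 2)
      = (PySem.List.pyRange 3 (r + 1) 1).map
        (fun j => (r - 1) * (r - 1) - (r - j) ^ 2) from by
    refine List.map_congr_left (fun j hj => ?_)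
    simp [pvRhoD]
    ring]
  rw [show (PySem.List.pyRange 3 (r + 1) 1).map (fun j => (r - 2) ^ 2 - pvRhoD r j ^ 2)
      = (PySem.List.pyRange 3 (r + 1) 1).map
        (fun j => (r - 2) * (r - 2) - (r - j) ^ 2) from by
    refine List.map_congr_left (fun j hj => ?_)
    simp [pvRhoD]
    ring]
  rw [show (PySem.List.pyRange 3 (r + 1) 1).map
        (fun i => ((PySem.List.pyRange (i + 1) (r + 1) 1).map
          (fun j => pvLD p q r i ^ 2 - pvLD p q r j ^ 2)).prod)
      = (PySem.List.pyRange 3 (r + 1) 1).map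
        (fun i => ((PySem.List.pyRange (i + 1) (r + 1) 1).map
          (fun j => pvRhoD r i ^ 2 - pvRhoD r j ^ 2)).prod) from by
    refine List.map_congr_left (fun i hi => ?_)
    rw [PySem.List.mem_pyRange_one] at hi
    congr 1
    refine List.map_congr_left (fun j hj => ?_)
    rw [PySem.List.mem_pyRange_one] at hj
    simp [pvLD, pvLamf, show i ≠ 1 from by omega, show i ≠ 2 from by omega,
      show j ≠ 1 from by omega, show j ≠ 2 from by omega]]
  rw [List.prod_map_mul, List.prod_map_mul]
  set a1 := (List.map (fun j => (p + r - 1) * (p + r - 1) - (r - j) ^ 2)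
      (PySem.List.pyRange 3 (r + 1) 1)).prod with ha1
  set a2 := (List.map (fun j => (q + r - 2) * (q + r - 2) - (r - j) ^ 2)
      (PySem.List.pyRange 3 (r + 1) 1)).prod with ha2
  set d1 := (List.map (fun j => (r - 1) * (r - 1) - (r - j) ^ 2)
      (PySem.List.pyRange 3 (r + 1) 1)).prod with hd1
  set d2 := (List.map (fun j => (r - 2) * (r - 2) - (r - j) ^ 2)
      (PySem.List.pyRange 3 (r + 1) 1)).prod with hd2
  set K := (List.map (fun i => ((PySem.List.pyRange (i + 1) (r + 1) 1).map
      (fun j => pvRhoD r i ^ 2 - pvRhoD r j ^ 2)).prod) (PySem.List.pyRange 3 (r + 1) 1)).prod with hK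
  have hKpos : 0 < K := by
    rw [hK]
    refine List.prod_pos (fun x hx => ?_)
    obtain ⟨i, hi, rfl⟩ := List.mem_map.1 hx
    rw [PySem.List.mem_pyRange_one] at hi
    refine List.prod_pos (fun y hy => ?_)
    obtain ⟨j, hj, rfl⟩ := List.mem_map.1 hy
    rw [PySem.List.mem_pyRange_one] at hj
    exact pv_sq_sub_pos _ _ (by unfold pvRhoD; omega) (by unfold pvRhoD; omega)
  have hd1pos : 0 < d1 := by
    rw [hd1]
    refine List.prod_pos (fun x hx => ?_)
    obtain ⟨j, hj, rfl⟩ := List.mem_map.1 hx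
    rw [PySem.List.mem_pyRange_one] at hj
    have h := pv_sq_sub_pos (r - 1) (r - j) (by omega) (by omega)
    nlinarith [h]
  have hd2pos : 0 < d2 := by
    rw [hd2]
    refine List.prod_pos (fun x hx => ?_)
    obtain ⟨j, hj, rfl⟩ := List.mem_map.1 hx
    rw [PySem.List.mem_pyRange_one] at hj
    have h := pv_sq_sub_pos (r - 2) (r - j) (by omega) (by omega)
    nlinarith [h]
  have hden2 : 0 < ((r - 1) * (r - 1) - (r - 2) * (r - 2)) * (d1 * d2) := by
    have hsc : 0 < (r - 1) * (r - 1) - (r - 2) * (r - 2) := by nlinarith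
    exact mul_pos hsc (mul_pos hd1pos hd2pos)
  conv_rhs => rw [← pv_floordiv_scale _ _ K hden2 hKpos]
  congr 1 <;> ring

lemma pv_dim_eq (p q N : Int) (h5 : 5 ≤ N) : pvDimSOAlt p q N = pvDimSO p q N := by
  unfold pvDimSOAlt pvDimSO
  rcases PySem.Int.mod_two_eq N with h | h
  · rw [if_neg (by omega), if_neg (by omega)]
    have hdvd : (2 : Int) ∣ N := (PySem.Int.mod_eq_zero_iff_dvd N 2).1 h
    have hr : 3 ≤ PySem.Int.floordiv N 2 := by
      rw [PySem.Int.floordiv_eq_ediv_of_pos (by norm_num)]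
      omega
    exact (pv_dimD_eq p q _ hr).symm
  · rw [if_pos h, if_pos h]
    have hr : 2 ≤ PySem.Int.floordiv (N - 1) 2 := by
      rw [PySem.Int.floordiv_eq_ediv_of_pos (by norm_num)]
      omega
    exact (pv_dimB_eq p q _ hr).symm

-- ---- part 2: dict accumulation vs sort-then-group (aggregation) ----

-- the qualifying (lam, d) pairs, in generation order
def pvSel (n : Int) (N : Int) (p : Int) (q : Int) : Option (Int × Int) :=
  if pvDimSO p q N > 0 then some (p * (p + n) + q * (q + n - 2), pvDimSO p q N) else none

def pvSelAlt (n : Int) (N : Int) (p : Int) (q : Int) : Option (Int × Int) :=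
  if pvDimSOAlt p q N > 0 then some (p * (p + n) + q * (q + n - 2), pvDimSOAlt p q N) else none

def pvPairs (n : Int) (P_max : Int) : List (Int × Int) :=
  (PySem.List.pyRange 0 P_max 1).flatMap
    (fun p => (PySem.List.pyRange 0 (p + 1) 1).filterMap (pvSel n (n + 2) p))

def pvPairsAlt (n : Int) (P_max : Int) : List (Int × Int) :=
  (PySem.List.pyRange 0 P_max 1).flatMap
    (fun p => (PySem.List.pyRange 0 (p + 1) 1).filterMap (pvSelAlt n (n + 2) p))

def pvSumv (l : List (Int × Int)) (k : Int) : Int :=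
  ((l.filter (fun t => t.1 == k)).map (fun t => t.2)).sum

def pvKeys (l : List (Int × Int)) : List Int := PySem.List.dedup (l.map (fun t => t.1))

def pvIns (d : PySem.Dict Int Int) (t : Int × Int) : PySem.Dict Int Int :=
  d.insert t.1 (d.getD t.1 0 + t.2)

def pvStep (st : List Int × List Int) (t : Int × Int) : List Int × List Int :=
  if st.1.getLast? == some t.1 then (st.1, st.2.dropLast ++ [st.2.getLastD 0 + t.2])
  else (st.1 ++ [t.1], st.2 ++ [t.2])

lemma pv_foldl_if_filterMap {β γ δ : Type} (l : List β) (c : β → Prop) [DecidablePred c]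
    (h : β → γ) (g : δ → γ → δ) (init : δ) :
    l.foldl (fun acc x => if c x then g acc (h x) else acc) init
      = (l.filterMap (fun x => if c x then some (h x) else none)).foldl g init := by
  induction l generalizing init with
  | nil => rfl
  | cons a t ih => by_cases hc : c a <;> simp [hc, ih]

lemma pv_getD_foldl_ins (l : List (Int × Int)) (d : PySem.Dict Int Int) (k : Int) :
    (l.foldl pvIns d).getD k 0 = d.getD k 0 + pvSumv l k := by
  induction l generalizing d with
  | nil => simp [pvSumv]
  | cons a t ih =>
    simp only [List.foldl_cons, ih, pvIns, pvSumv, List.filter_cons]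
    by_cases h : a.1 = k
    · simp [h]
      ring
    · simp [PySem.Dict.getD_insert, h, Ne.symm h]

lemma pv_keys_foldl_ins (l : List (Int × Int)) :
    (l.foldl pvIns PySem.Dict.empty).keys = pvKeys l := by
  have h := PySem.Dict.keys_foldl_insert_key l (fun t => t.1)
      (fun d t => d.getD t.1 0 + t.2) PySem.Dict.empty
  have he : (List.foldl (fun d t => d.insert t.1 (d.getD t.1 0 + t.2)) PySem.Dict.empty l)
      = l.foldl pvIns PySem.Dict.empty := rfl
  rw [he] at h
  rw [h]
  rfl

lemma pv_nodup_keys (l : List (Int × Int)) :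
    (l.foldl pvIns PySem.Dict.empty).keys.Nodup := by
  have h := PySem.Dict.nodup_keys_foldl_insert_key l (fun t => t.1)
      (fun d t => d.getD t.1 0 + t.2) PySem.Dict.empty (by simp)
  exact h

lemma pv_items_foldl_ins (l : List (Int × Int)) :
    (l.foldl pvIns PySem.Dict.empty).items
      = (pvKeys l).map (fun k => (k, pvSumv l k)) := by
  rw [PySem.Dict.items_eq_map_keys _ (pv_nodup_keys l) 0, pv_keys_foldl_ins]
  refine List.map_congr_left (fun k _ => ?_)
  rw [pv_getD_foldl_ins, PySem.Dict.getD_empty, zero_add]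

lemma pv_insertBy_congr {α : Type} (f g : α → α → Bool) (x : α) (ys : List α)
    (h : ∀ y ∈ ys, f x y = g x y) :
    PySem.List.insertBy f x ys = PySem.List.insertBy g x ys := by
  induction ys with
  | nil => rfl
  | cons y t ih =>
    have hy := h y (by simp)
    simp only [PySem.List.insertBy, hy]
    by_cases hg : g x y = true
    · simp [hg]
    · simp only [hg]
      have := ih (fun z hz => h z (by simp [hz]))
      simp [this]

lemma pv_foldl_insertBy_congr {α : Type} (f g : α → α → Bool) (S : List α)
    (hfg : ∀ a ∈ S, ∀ b ∈ S, f a b = g a b) :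
    ∀ (l acc : List α), (∀ x ∈ l, x ∈ S) → (∀ x ∈ acc, x ∈ S) →
      l.foldl (fun acc x => PySem.List.insertBy f x acc) acc
        = l.foldl (fun acc x => PySem.List.insertBy g x acc) acc := by
  intro l
  induction l with
  | nil => intro acc _ _; rfl
  | cons a t ih =>
    intro acc hl hacc
    have ha : a ∈ S := hl a (by simp)
    have h1 : PySem.List.insertBy f a acc = PySem.List.insertBy g a acc :=
      pv_insertBy_congr f g a acc (fun y hy => hfg a ha y (hacc y hy))
    simp only [List.foldl_cons, h1]
    exact ih _ (fun x hx => hl x (by simp [hx]))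
      (fun x hx => by
        rcases (PySem.List.mem_insertBy g a x acc).1 hx with h | h
        · exact h ▸ ha
        · exact hacc x h)

lemma pv_ofList_sublist {α : Type} [BEq α] (xs : List α) :
    (PySem.Set.ofList xs : List α).Sublist xs := by
  induction xs using List.reverseRecOn with
  | nil => simp [PySem.Set.ofList, PySem.Set.empty]
  | append_singleton ys x ih =>
    show ((ys ++ [x]).foldl PySem.Set.add PySem.Set.empty : List α).Sublist (ys ++ [x])
    rw [List.foldl_append]
    show (PySem.Set.add (PySem.Set.ofList ys) x : List α).Sublist (ys ++ [x])
    unfold PySem.Set.add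
    by_cases hc : (PySem.Set.ofList ys : List α).contains x = true
    · simp only [hc, if_pos]
      exact ih.trans (List.sublist_append_left ys [x])
    · simp only [hc, if_neg, Bool.false_eq_true, not_false_iff]
      exact ih.append (List.Sublist.refl [x])

lemma pv_sorted2_eq_sorted_fst (xs : List (Int × Int))
    (hnd : (xs.map (fun t => t.1)).Nodup) :
    PySem.List.sorted2 xs (fun t => t.1) (fun t => t.2) false
      = PySem.List.sorted xs (fun t => t.1) false := by
  show xs.foldl (fun acc x => PySem.List.insertBy
      (fun a b => decide (a.1 < b.1) || (!decide (b.1 < a.1) && decide (a.2 < b.2))) x acc) []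
    = xs.foldl (fun acc x => PySem.List.insertBy (fun a b => decide (a.1 < b.1)) x acc) []
  refine pv_foldl_insertBy_congr _ _ xs ?_ xs [] (fun x hx => hx) (by simp)
  intro a ha b hb
  by_cases h : a.1 = b.1
  · have hab : a = b := List.inj_on_of_nodup_map hnd ha hb h
    subst hab
    simp
  · rcases lt_trichotomy a.1 b.1 with h1 | h1 | h1
    · simp [h1]
    · exact absurd h1 h
    · simp [h1, not_lt_of_gt h1]

lemma pv_pairwise_lt_keys {l : List (Int × Int)}
    (h : l.Pairwise (fun a b => a.1 ≤ b.1)) : (pvKeys l).Pairwise (· < ·) := by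
  have hle : (l.map (fun t => t.1)).Pairwise (· ≤ ·) := List.pairwise_map.2 h
  have hsub : (pvKeys l).Sublist (l.map (fun t => t.1)) := by
    unfold pvKeys
    rw [PySem.List.dedup_eq_ofList]
    exact pv_ofList_sublist _
  have h1 : (pvKeys l).Pairwise (· ≤ ·) := List.Pairwise.sublist hsub hle
  have h2 : (pvKeys l).Pairwise (· ≠ ·) := PySem.List.nodup_dedup _
  exact (h1.and h2).imp (fun hab => lt_of_le_of_ne hab.1 hab.2)

lemma pv_keys_append (l : List (Int × Int)) (x : Int × Int) :
    pvKeys (l ++ [x]) = if x.1 ∈ pvKeys l then pvKeys l else pvKeys l ++ [x.1] := by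
  unfold pvKeys
  rw [PySem.List.dedup_eq_ofList, PySem.List.dedup_eq_ofList]
  rw [List.map_append]
  show List.foldl PySem.Set.add PySem.Set.empty (l.map (fun t => t.1) ++ [x.1]) = _
  rw [List.foldl_append]
  show PySem.Set.add (PySem.Set.ofList (l.map (fun t => t.1))) x.1 = _
  unfold PySem.Set.add
  by_cases h : x.1 ∈ (PySem.Set.ofList (l.map (fun t => t.1)) : List Int)
  · simp [h]
  · simp [h]

lemma pv_sumv_append (l : List (Int × Int)) (x : Int × Int) (k : Int) :
    pvSumv (l ++ [x]) k = pvSumv l k + (if x.1 = k then x.2 else 0) := by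
  unfold pvSumv
  rw [List.filter_append, List.map_append, List.sum_append]
  by_cases h : x.1 = k <;> simp [h]

lemma pv_sumv_not_mem (l : List (Int × Int)) (k : Int)
    (h : k ∉ l.map (fun t => t.1)) : pvSumv l k = 0 := by
  unfold pvSumv
  have hf : l.filter (fun t => t.1 == k) = [] :=
    List.filter_eq_nil_iff.2 (fun a ha hak =>
      h (List.mem_map.2 ⟨a, ha, by simpa [beq_iff_eq] using hak⟩))
  simp [hf]

lemma pv_getLast_max {ks : List Int} {m : Int} (hp : ks.Pairwise (· < ·)) (hm : m ∈ ks)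
    (hub : ∀ z ∈ ks, z ≤ m) : ks.getLast? = some m := by
  induction ks with
  | nil => cases hm
  | cons k t ih =>
    cases t with
    | nil =>
      simp only [List.mem_singleton] at hm
      simp [hm]
    | cons b t' =>
      rw [List.getLast?_cons_cons]
      have hpt : (b :: t').Pairwise (· < ·) := hp.of_cons
      have hmt : m ∈ b :: t' := by
        rcases List.mem_cons.1 hm with rfl | hmem
        · have h1 : m < b := (List.pairwise_cons.1 hp).1 b (by simp)
          have h2 : b ≤ m := hub b (by simp)
          omega
        · exact hmem
      exact ih hpt hmt (fun z hz => hub z (by simp [hz]))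

lemma pv_group_of_sorted (S : List (Int × Int))
    (h : S.Pairwise (fun a b => a.1 ≤ b.1)) :
    S.foldl pvStep ([], []) = (pvKeys S, (pvKeys S).map (fun k => pvSumv S k)) := by
  induction S using List.reverseRecOn with
  | nil => rfl
  | append_singleton T x ih =>
    obtain ⟨hT, -, hub⟩ := List.pairwise_append.1 h
    have hub' : ∀ a ∈ T, a.1 ≤ x.1 := fun a ha => hub a ha x (by simp)
    have hkm : ∀ z ∈ pvKeys T, z ≤ x.1 := by
      intro z hz
      have hz' : z ∈ T.map (fun t => t.1) := (PySem.List.mem_dedup _ _).1 hz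
      obtain ⟨a, ha, rfl⟩ := List.mem_map.1 hz'
      exact hub' a ha
    have hnd : (pvKeys T).Nodup := PySem.List.nodup_dedup _
    have hplt : (pvKeys T).Pairwise (· < ·) := pv_pairwise_lt_keys hT
    rw [List.foldl_append, List.foldl_cons, List.foldl_nil, ih hT, pv_keys_append T x]
    by_cases hx : x.1 ∈ pvKeys T
    · have hlast : (pvKeys T).getLast? = some x.1 := pv_getLast_max hplt hx hkm
      obtain ⟨E, hE⟩ := List.getLast?_eq_some_iff.1 hlast
      have hxE : x.1 ∉ E := by
        have hnd' := hnd
        rw [hE] at hnd'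
        intro hmem
        exact (List.nodup_append.1 hnd').2.2 x.1 hmem x.1 (by simp) rfl
      simp only [hx, if_pos]
      unfold pvStep
      simp only [hlast, beq_self_eq_true, if_pos]
      refine Prod.ext rfl ?_
      rw [hE, List.map_append, List.map_append]
      simp only [List.map_cons, List.map_nil]
      rw [List.dropLast_concat, List.getLastD_concat]
      have hlastval : pvSumv (T ++ [x]) x.1 = pvSumv T x.1 + x.2 := by
        rw [pv_sumv_append]; simp
      have hcong : E.map (fun k => pvSumv (T ++ [x]) k) = E.map (fun k => pvSumv T k) := by
        refine List.map_congr_left (fun k hk => ?_)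
        have hkne : x.1 ≠ k := fun heq => hxE (heq ▸ hk)
        rw [pv_sumv_append]
        simp [hkne]
      rw [hcong, hlastval]
    · have hcond : ((pvKeys T).getLast? == some x.1) = false := by
        cases hL : (pvKeys T).getLast? with
        | none => rfl
        | some z =>
          have hzmem : z ∈ pvKeys T := by
            obtain ⟨E, hE⟩ := List.getLast?_eq_some_iff.1 hL
            rw [hE]; simp
          have hne : z ≠ x.1 := fun hzx => hx (hzx ▸ hzmem)
          simp [hne]
      unfold pvStep
      simp only [hcond, Bool.false_eq_true, if_neg, not_false_iff]
      simp only [hx, if_neg, not_false_iff]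
      refine Prod.ext rfl ?_
      rw [List.map_append]
      simp only [List.map_cons, List.map_nil]
      have hnotmem : x.1 ∉ T.map (fun t => t.1) := fun hmem =>
        hx ((PySem.List.mem_dedup _ _).2 hmem)
      have hlastval : pvSumv (T ++ [x]) x.1 = x.2 := by
        rw [pv_sumv_append, pv_sumv_not_mem T x.1 hnotmem]; simp
      have hcong : (pvKeys T).map (fun k => pvSumv (T ++ [x]) k)
          = (pvKeys T).map (fun k => pvSumv T k) := by
        refine List.map_congr_left (fun k hk => ?_)
        have hkne : x.1 ≠ k := fun heq => hx (heq ▸ hk)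
        rw [pv_sumv_append]
        simp [hkne]
      rw [hcong, hlastval]

def pvAform (l : List (Int × Int)) : List Int × List Int :=
  let items := PySem.List.sorted2 (l.foldl pvIns PySem.Dict.empty).items
      (fun t => t.1) (fun t => t.2) false
  (items.map (fun t => t.1), items.map (fun t => t.2))

def pvBform (l : List (Int × Int)) : List Int × List Int :=
  (PySem.List.sorted l (fun t => t.1) false).foldl pvStep ([], [])

lemma pv_main (l : List (Int × Int)) : pvAform l = pvBform l := by
  unfold pvAform pvBform
  rw [pv_items_foldl_ins]
  have hnd : (((pvKeys l).map (fun k => (k, pvSumv l k))).map (fun t => t.1)).Nodup := by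
    have h1 : ((pvKeys l).map (fun k => (k, pvSumv l k))).map (fun t => t.1) = pvKeys l := by
      rw [List.map_map]
      exact List.map_id' _
    rw [h1]
    exact PySem.List.nodup_dedup _
  rw [pv_sorted2_eq_sorted_fst _ hnd]
  have hC : PySem.List.sorted ((pvKeys l).map (fun k => (k, pvSumv l k))) (fun t => t.1) false
      = (PySem.List.sorted (pvKeys l) (fun x => x) false).map (fun k => (k, pvSumv l k)) := by
    apply PySem.List.sorted_eq_of_perm_of_pairwise_lt
    · exact (PySem.List.sorted_perm (pvKeys l) (fun x => x) false).map _
    · refine List.pairwise_map.2 ?_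
      have hlt := PySem.List.sorted_ofList_pairwise_lt (l.map (fun t => t.1))
      have hk : pvKeys l = PySem.Set.ofList (l.map (fun t => t.1)) := rfl
      rw [hk]
      exact hlt
  rw [hC]
  have hBS := pv_group_of_sorted (PySem.List.sorted l (fun t => t.1) false)
      (PySem.List.sorted_pairwise l (fun t => t.1))
  rw [hBS]
  have hperm : (PySem.List.sorted l (fun t => t.1) false).Perm l :=
    PySem.List.sorted_perm l (fun t => t.1) false
  have hsumv : ∀ k, pvSumv (PySem.List.sorted l (fun t => t.1) false) k = pvSumv l k := by
    intro k
    unfold pvSumv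
    exact ((hperm.filter _).map _).sum_eq
  have hkeys : pvKeys (PySem.List.sorted l (fun t => t.1) false)
      = PySem.List.sorted (pvKeys l) (fun x => x) false := by
    symm
    apply PySem.List.sorted_eq_of_perm_of_pairwise_lt
    · refine (List.perm_ext_iff_of_nodup (PySem.List.nodup_dedup _)
        (PySem.List.nodup_dedup _)).2 ?_
      intro a
      rw [PySem.List.mem_dedup, PySem.List.mem_dedup]
      exact (hperm.map (fun t => t.1)).mem_iff
    · exact pv_pairwise_lt_keys (PySem.List.sorted_pairwise l (fun t => t.1))
  rw [hkeys]
  refine Prod.ext ?_ ?_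
  · show ((PySem.List.sorted (pvKeys l) (fun x => x) false).map
        (fun k => (k, pvSumv l k))).map (fun t => t.1)
        = PySem.List.sorted (pvKeys l) (fun x => x) false
    rw [List.map_map]
    exact List.map_id' _
  · show ((PySem.List.sorted (pvKeys l) (fun x => x) false).map
        (fun k => (k, pvSumv l k))).map (fun t => t.2)
        = (PySem.List.sorted (pvKeys l) (fun x => x) false).map
            (fun k => pvSumv (PySem.List.sorted l (fun t => t.1) false) k)
    rw [List.map_map]
    exact List.map_congr_left (fun k _ => (hsumv k).symm)

lemma pv_portA_eq (n : Int) (P_max : Int) :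
    build_spectrum n P_max = pvAform (pvPairs n P_max) := by
  have hinner : ∀ (p : Int) (spec : PySem.Dict Int Int),
      (PySem.List.pyRange 0 (p + 1) 1).foldl
        (fun spec q =>
          if pvDimSO p q (n + 2) > 0 then
            spec.insert (p * (p + n) + q * (q + n - 2))
              (spec.getD (p * (p + n) + q * (q + n - 2)) 0 + pvDimSO p q (n + 2))
          else spec) spec
      = ((PySem.List.pyRange 0 (p + 1) 1).filterMap (pvSel n (n + 2) p)).foldl pvIns spec :=
    fun p spec => pv_foldl_if_filterMap (PySem.List.pyRange 0 (p + 1) 1)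
      (fun q => pvDimSO p q (n + 2) > 0)
      (fun q => (p * (p + n) + q * (q + n - 2), pvDimSO p q (n + 2))) pvIns spec
  simp only [build_spectrum, pvAform, hinner]
  rw [pvPairs, List.foldl_flatMap]

lemma pv_portB_eq (n : Int) (P_max : Int) :
    build_spectrum_alt n P_max = pvBform (pvPairsAlt n P_max) := by
  have hinner : ∀ (p : Int) (acc : List (Int × Int)),
      (PySem.List.pyRange 0 (p + 1) 1).foldl
        (fun acc q =>
          if pvDimSOAlt p q (n + 2) > 0 then
            acc ++ [(p * (p + n) + q * (q + n - 2), pvDimSOAlt p q (n + 2))]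
          else acc) acc
      = ((PySem.List.pyRange 0 (p + 1) 1).filterMap (pvSelAlt n (n + 2) p)).foldl
          (fun acc y => acc ++ [y]) acc :=
    fun p acc => pv_foldl_if_filterMap (PySem.List.pyRange 0 (p + 1) 1)
      (fun q => pvDimSOAlt p q (n + 2) > 0)
      (fun q => (p * (p + n) + q * (q + n - 2), pvDimSOAlt p q (n + 2)))
      (fun acc y => acc ++ [y]) acc
  simp only [build_spectrum_alt, pvBform, hinner]
  rw [pvPairsAlt, ← List.foldl_flatMap, PySem.List.foldl_append_singleton, List.nil_append]
  rfl

lemma pv_pairs_eq (n : Int) (P_max : Int) (h : Pre_build_spectrum n P_max) :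
    pvPairsAlt n P_max = pvPairs n P_max := by
  rcases h with h | h
  · unfold pvPairsAlt pvPairs
    rw [PySem.List.pyRange_one_eq_nil (by omega)]
    simp
  · have hd : pvSelAlt n (n + 2) = pvSel n (n + 2) := by
      funext p q
      unfold pvSelAlt pvSel
      rw [pv_dim_eq p q (n + 2) (by omega)]
    unfold pvPairsAlt pvPairs
    rw [hd]

-- ===== VERDICT (by name: the statement is the Claim_ definition above) =====
theorem build_spectrum_spec : Claim_equal_build_spectrum := by
  intro n P_max _ hpre
  unfold Spec_build_spectrum
  rw [pv_portA_eq, pv_portB_eq, pv_pairs_eq n P_max hpre, pv_main]
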